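-- pv_equiv track=rewrite | github.com/vivekgautham/codingchallenges | challenges/src/datastructures/graph.py | isPseudoforest
-- ===== SOURCE A (Python) =====
-- def isPseudoforest(n, wmap):
--     from collections import defaultdict, deque
--     graphDict = defaultdict(list)
--     edgeCt = defaultdict(int)
--     for each in wmap:
--         graphDict[each[0]].append(each[1])
--         edgeCt[each[0]] += 1
--
--     if not graphDict:
--         return True
--
--     def _dfs(node, group, graphDict):
--         if visited[node]:
--             return
--         group.add(node)
--         visited[node] = True
--         for eachNode in graphDict[node]:
--             if not visited[eachNode]:
--                 _dfs(eachNode, group, graphDict)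
--
--     result = []
--     visited = [False]*n
--     for en in range(n):
--         gp = set()
--         _dfs(en, gp, graphDict)
--         if len(gp) > 2:
--             noe = 0
--             for each in gp:
--                 noe += edgeCt.get(each, 0)
--             result.append(noe - len(gp) + 1)
--     return all([res <= 1 for res in result])
-- ===== SOURCE B (Python) =====
-- def isPseudoforest(n, wmap):
--     adj = {}
--     for e in wmap:
--         adj.setdefault(e[0], []).append(e[1])
--     if not wmap:
--         return True
--     visited = [False] * n
--     for en in range(n):
--         comp = []
--         stack = [en]
--         while stack:
--             x = stack.pop()
--             if not visited[x]:
--                 visited[x] = True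
--                 comp.append(x)
--                 stack.extend(reversed(adj.get(x, [])))
--         if len(comp) > 2:
--             edges = sum(len(adj.get(x, [])) for x in comp)
--             if edges - len(comp) + 1 > 1:
--                 return False
--     return True
-- ===== Notes on version B (the rewrite author's own statement) =====
-- stated objective: simpler
-- what changed: Replaces the recursive _dfs with an explicit-stack iterative DFS, drops the separate out-degree counter dict (out-degree of a node is just the length of its adjacency list), and returns False early instead of collecting a result list and calling all().
-- outside the precondition, e.g. on isPseudoforest(7, [[-4, 8]]): A returns True, B returns True
import Mathlib
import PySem

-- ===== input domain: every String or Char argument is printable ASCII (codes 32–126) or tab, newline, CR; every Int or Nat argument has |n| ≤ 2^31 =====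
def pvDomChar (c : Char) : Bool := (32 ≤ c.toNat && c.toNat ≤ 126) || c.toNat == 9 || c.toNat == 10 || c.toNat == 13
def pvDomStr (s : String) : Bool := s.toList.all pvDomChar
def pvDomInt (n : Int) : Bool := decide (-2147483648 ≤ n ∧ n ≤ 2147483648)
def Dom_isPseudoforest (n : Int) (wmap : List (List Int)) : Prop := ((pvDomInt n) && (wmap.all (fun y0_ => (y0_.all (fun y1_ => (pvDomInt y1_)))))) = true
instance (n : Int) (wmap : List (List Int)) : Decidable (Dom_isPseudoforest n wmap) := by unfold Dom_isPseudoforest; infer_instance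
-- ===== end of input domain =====

-- B replaces A's recursive per-node DFS by one explicit-stack iterative DFS and drops the
-- separate out-degree counter (out-degree = adjacency-list length), with an early `return False`
-- instead of collecting a result list; objective: simpler, same asymptotic cost.

-- helper lemmas that the B port's termination proof cites (everything else is below the claim block)
theorem pv_idx_spec (v : List Bool) (x : Int) (b : Bool) (h : PySem.List.pyGet? v x = some b) :
    ∃ k : Nat, PySem.List.pyIdx? v.length x = some k ∧ k < v.length ∧ v[k]? = some b := by
  unfold PySem.List.pyGet? at h
  cases hi : PySem.List.pyIdx? v.length x with
  | none => rw [hi] at h; simp at h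
  | some k =>
    rw [hi] at h; simp at h
    exact ⟨k, rfl, (List.getElem?_eq_some_iff.mp h).1, h⟩

theorem pv_setD_eq_set (v : List Bool) (x : Int) (c : Bool)
    (k : Nat) (hk : PySem.List.pyIdx? v.length x = some k) :
    PySem.List.pySetD v x c = v.set k c := by
  unfold PySem.List.pySetD PySem.List.pySet?
  rw [hk]; rfl

theorem pv_mark_lt (v : List Bool) (x : Int) (h : PySem.List.pyGet? v x = some false) :
    (PySem.List.pySetD v x true).count false < v.count false := by
  obtain ⟨k, hk, hlt, hget⟩ := pv_idx_spec v x false h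
  rw [pv_setD_eq_set v x true k hk]
  have hkv : v[k] = false := (List.getElem?_eq_some_iff.mp hget).2
  conv_rhs => rw [show v = v.take k ++ v[k] :: v.drop (k+1) from
    (List.getElem_cons_drop hlt ▸ (List.take_append_drop k v).symm)]
  rw [List.set_eq_take_cons_drop true hlt]
  simp [List.count_append, hkv]

-- ===== PORT A =====
-- for each in wmap: graphDict[each[0]].append(each[1]); edgeCt[each[0]] += 1
-- (an edge list of length < 2 raises IndexError in Python: excluded by Pre_, junk arm leaves the state)
def pvBuildA (wmap : List (List Int)) : PySem.Dict Int (List Int) × PySem.Dict Int Int :=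
  wmap.foldl (fun st each =>
    match each with
    | a :: b :: _ => (st.1.insert a (st.1.getD a [] ++ [b]), st.2.insert a (st.2.getD a 0 + 1))
    | _ => st)
    (PySem.Dict.empty, PySem.Dict.empty)

-- _dfs(node, group, graphDict): fueled recursion; fuel n.toNat+1 always exceeds the recursion
-- depth Python reaches (each deeper call marks a fresh in-range node), so the 0-fuel arm —
-- which returns like the visited-guard — is never the reason a node stays unvisited.
-- `visited[node]` on an out-of-range node raises IndexError in Python: excluded by Pre_ (junk: return).
def pvDfsA (g : PySem.Dict Int (List Int)) : Nat → Int → List Bool × List Int → List Bool × List Int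
  | 0, _, st => st
  | fuel+1, node, st =>
    match PySem.List.pyGet? st.1 node with
    | some false =>
      -- group.add(node); visited[node] = True
      let gp1 : PySem.Set Int := PySem.Set.add st.2 node
      let v1 := PySem.List.pySetD st.1 node true
      -- for eachNode in graphDict[node]: if not visited[eachNode]: _dfs(eachNode, …)
      (g.getD node []).foldl (fun st2 nb =>
        match PySem.List.pyGet? st2.1 nb with
        | some false => pvDfsA g fuel nb st2
        | _ => st2) (v1, gp1)
    | _ => st

-- for en in range(n): gp = set(); _dfs(en, gp, graphDict); if len(gp) > 2: … result.append(…)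
-- (the sum over the Python set gp is order-independent, so Set iteration is exact here)
def pvLoopA (g : PySem.Dict Int (List Int)) (ect : PySem.Dict Int Int) (fuel : Nat) :
    List Int → List Bool → List Int → List Bool × List Int
  | [], v, acc => (v, acc)
  | en :: rest, v, acc =>
    let r := pvDfsA g fuel en (v, [])
    if 2 < r.2.length then
      let noe := r.2.foldl (fun acc2 x => acc2 + ect.getD x 0) 0
      pvLoopA g ect fuel rest r.1 (acc ++ [noe - (r.2.length : Int) + 1])
    else pvLoopA g ect fuel rest r.1 acc

def isPseudoforest (n : Int) (wmap : List (List Int)) : Bool :=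
  let bd := pvBuildA wmap
  if bd.1.items = [] then true
  else
    let res := (pvLoopA bd.1 bd.2 (n.toNat + 1) (PySem.List.pyRange 0 n 1)
      (List.replicate n.toNat false) []).2
    (res.map (fun r => decide (r ≤ 1))).all id

-- ===== PORT B =====
-- adj.setdefault(e[0], []).append(e[1])  ==  adj[e[0]] = adj.get(e[0], []) + [e[1]]
def pvAdjB (wmap : List (List Int)) : PySem.Dict Int (List Int) :=
  wmap.foldl (fun d e =>
    match e with
    | a :: b :: _ => d.insert a (d.getD a [] ++ [b])
    | _ => d)
    PySem.Dict.empty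

-- while stack: x = stack.pop(); if not visited[x]: mark, comp.append(x), stack.extend(reversed(adj.get(x, [])))
-- (head of the Lean list = top of the Python stack, so the reversed extend is a plain prepend;
--  `visited[x]` out of range raises IndexError in Python: excluded by Pre_, junk arm skips)
def pvDfsB (g : PySem.Dict Int (List Int)) : List Int → List Bool → List Int → List Bool × List Int
  | [], v, comp => (v, comp)
  | x :: stack, v, comp =>
    match h : PySem.List.pyGet? v x with
    | some false => pvDfsB g (g.getD x [] ++ stack) (PySem.List.pySetD v x true) (comp ++ [x])
    | _ => pvDfsB g stack v comp
termination_by stack v _ => (v.count false, stack.length)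
decreasing_by
  · exact Prod.Lex.left _ _ (pv_mark_lt v x h)
  · exact Prod.Lex.right _ (Nat.lt_succ_self _)

-- for en in range(n): … ; early `return False` ends the loop
def pvLoopB (adj : PySem.Dict Int (List Int)) : List Int → List Bool → Bool
  | [], _ => true
  | en :: rest, v =>
    let r := pvDfsB adj [en] v []
    if 2 < r.2.length then
      let edges := (r.2.map (fun x => ((adj.getD x []).length : Int))).sum
      if 1 < edges - (r.2.length : Int) + 1 then false
      else pvLoopB adj rest r.1
    else pvLoopB adj rest r.1

def isPseudoforest_alt (n : Int) (wmap : List (List Int)) : Bool :=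
  let adj := pvAdjB wmap
  if wmap = [] then true
  else pvLoopB adj (PySem.List.pyRange 0 n 1) (List.replicate n.toNat false)

-- ===== PRECONDITION & SPEC =====
-- Pre_ excludes inputs on which Python A raises: an edge list with fewer than two entries
-- (IndexError in the build loop), and edges from an in-range source to an out-of-range target
-- (IndexError at `visited[eachNode]` when the source is reached).  It also excludes some inputs
-- A does return on — edges whose out-of-range target is never reached because the (in-range,
-- possibly negative) source node is never visited: reachability is not a closed-form condition,
-- so Pre_ uses the sufficient per-edge bound instead.
def Pre_isPseudoforest (n : Int) (wmap : List (List Int)) : Prop :=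
  ∀ e ∈ wmap, 2 ≤ e.length ∧
    (PySem.Raise.InRange n.toNat (PySem.List.pyGetD e 0 0) →
     PySem.Raise.InRange n.toNat (PySem.List.pyGetD e 1 0))
instance (n : Int) (wmap : List (List Int)) : Decidable (Pre_isPseudoforest n wmap) := by
  unfold Pre_isPseudoforest; infer_instance

def pvWitness_isPseudoforest : Int × List (List Int) := (3, [[0, 1], [1, 2], [2, 0]])

def Spec_isPseudoforest (n : Int) (wmap : List (List Int)) (out : Bool) : Prop := out = isPseudoforest_alt n wmap
instance (n : Int) (wmap : List (List Int)) (out : Bool) : Decidable (Spec_isPseudoforest n wmap out) := by unfold Spec_isPseudoforest; infer_instance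

-- ===== CLAIM (what is proved, stated in full; the proofs are below) =====
def Claim_equal_isPseudoforest : Prop := ∀ (n : Int) (wmap : List (List Int)), Dom_isPseudoforest n wmap → Pre_isPseudoforest n wmap → Spec_isPseudoforest n wmap (isPseudoforest n wmap)

-- ===== LEMMAS AND PROOFS =====

theorem pvDfsB_mark (g : PySem.Dict Int (List Int)) (x : Int) (s : List Int) (v : List Bool) (c : List Int)
    (h : PySem.List.pyGet? v x = some false) :
    pvDfsB g (x :: s) v c = pvDfsB g (g.getD x [] ++ s) (PySem.List.pySetD v x true) (c ++ [x]) := by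
  rw [pvDfsB]; split
  · rfl
  · rename_i hne; exact absurd h (by simpa using hne)

theorem pvDfsB_skip (g : PySem.Dict Int (List Int)) (x : Int) (s : List Int) (v : List Bool) (c : List Int)
    (h : ¬ PySem.List.pyGet? v x = some false) :
    pvDfsB g (x :: s) v c = pvDfsB g s v c := by
  rw [pvDfsB]; split
  · rename_i hf; exact absurd hf h
  · rfl

theorem pv_get_setD_self (v : List Bool) (x : Int) (b c : Bool)
    (h : PySem.List.pyGet? v x = some b) :
    PySem.List.pyGet? (PySem.List.pySetD v x c) x = some c := by
  obtain ⟨k, hk, hlt, _⟩ := pv_idx_spec v x b h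
  rw [pv_setD_eq_set v x c k hk]
  unfold PySem.List.pyGet?
  rw [List.length_set, hk]
  simp [hlt]

theorem pv_get_setD_true_mono (v : List Bool) (x y : Int)
    (h : PySem.List.pyGet? v x = some true) :
    PySem.List.pyGet? (PySem.List.pySetD v y true) x = some true := by
  cases hy : PySem.List.pyIdx? v.length y with
  | none =>
    have : PySem.List.pySetD v y true = v := by
      unfold PySem.List.pySetD PySem.List.pySet?; rw [hy]; rfl
    rw [this]; exact h
  | some m =>
    obtain ⟨k, hk, hlt, hget⟩ := pv_idx_spec v x true h
    rw [pv_setD_eq_set v y true m hy]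
    unfold PySem.List.pyGet?
    rw [List.length_set, hk]
    simp only [Option.bind_some, List.getElem?_set]
    by_cases hmk : m = k
    · subst hmk; simp [hlt]
    · simp [hmk, hget]

theorem pv_dfsB_length (g : PySem.Dict Int (List Int)) (s : List Int) (v : List Bool) (c : List Int) :
    (pvDfsB g s v c).1.length = v.length := by
  fun_induction pvDfsB g s v c with
  | case1 => rfl
  | case2 x stack v comp h ih => rw [ih, PySem.List.length_pySetD]
  | case3 x stack v comp h ih => exact ih

theorem pv_dfsB_count_le (g : PySem.Dict Int (List Int)) (s : List Int) (v : List Bool) (c : List Int) :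
    (pvDfsB g s v c).1.count false ≤ v.count false := by
  fun_induction pvDfsB g s v c with
  | case1 => exact le_refl _
  | case2 x stack v comp h ih => exact le_of_lt (lt_of_le_of_lt ih (pv_mark_lt v x h))
  | case3 x stack v comp h ih => exact ih

theorem pv_dfsB_comp_inv (g : PySem.Dict Int (List Int)) (s : List Int) (v : List Bool) (c : List Int)
    (hc : ∀ y ∈ c, PySem.List.pyGet? v y = some true) :
    ∀ y ∈ (pvDfsB g s v c).2, PySem.List.pyGet? (pvDfsB g s v c).1 y = some true := by
  fun_induction pvDfsB g s v c with
  | case1 => exact hc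
  | case2 x stack v comp h ih =>
    refine ih ?_
    intro y hy
    rcases List.mem_append.mp hy with hy | hy
    · exact pv_get_setD_true_mono v y x (hc y hy)
    · rw [List.mem_singleton.mp hy]
      exact pv_get_setD_self v x false true h
  | case3 x stack v comp h ih => exact ih hc

theorem pv_dfsB_split (g : PySem.Dict Int (List Int)) (a b : List Int) (v : List Bool) (c : List Int) :
    pvDfsB g (a ++ b) v c = pvDfsB g b (pvDfsB g a v c).1 (pvDfsB g a v c).2 := by
  fun_induction pvDfsB g a v c with
  | case1 => rfl
  | case2 x stack v comp h ih =>
    rw [List.cons_append, pvDfsB_mark g x (stack ++ b) v comp h, ← List.append_assoc]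
    exact ih
  | case3 x stack v comp h ih =>
    rw [List.cons_append, pvDfsB_skip g x (stack ++ b) v comp h]
    exact ih

theorem pv_set_add_fresh (gp : List Int) (x : Int) (v : List Bool)
    (hinv : ∀ y ∈ gp, PySem.List.pyGet? v y = some true)
    (hx : PySem.List.pyGet? v x = some false) :
    PySem.Set.add gp x = gp ++ [x] := by
  have hmem : x ∉ gp := by
    intro hm
    have := hinv x hm
    rw [hx] at this
    simp at this
  simp [PySem.Set.add, PySem.Set.contains, hmem]

theorem pv_A2B (g : PySem.Dict Int (List Int)) (fuel : Nat) (x : Int) (v : List Bool) (gp : List Int)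
    (hfuel : v.count false ≤ fuel)
    (hinv : ∀ y ∈ gp, PySem.List.pyGet? v y = some true) :
    pvDfsA g fuel x (v, gp) = pvDfsB g [x] v gp := by
  induction fuel generalizing x v gp with
  | zero =>
    have hx : ¬ PySem.List.pyGet? v x = some false := by
      intro h
      obtain ⟨k, hk, hlt, hget⟩ := pv_idx_spec v x false h
      have hmem : false ∈ v := List.mem_of_getElem? hget
      have : 0 < v.count false := List.count_pos_iff.mpr hmem
      omega
    rw [pvDfsA, pvDfsB_skip g x [] v gp hx, pvDfsB]
  | succ f ih =>
    by_cases hv : PySem.List.pyGet? v x = some false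
    · rw [pvDfsA, hv]
      simp only
      rw [pv_set_add_fresh gp x v hinv hv,
          pvDfsB_mark g x [] v gp hv, List.append_nil]
      have hcnt : (PySem.List.pySetD v x true).count false ≤ f := by
        have := pv_mark_lt v x hv; omega
      have hinv1 : ∀ y ∈ gp ++ [x], PySem.List.pyGet? (PySem.List.pySetD v x true) y = some true := by
        intro y hy
        rcases List.mem_append.mp hy with hy | hy
        · exact pv_get_setD_true_mono v y x (hinv y hy)
        · rw [List.mem_singleton.mp hy]
          exact pv_get_setD_self v x false true hv
      -- generalized claim: the guarded fold over any neighbour list equals running the stack on it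
      have FOLD : ∀ (l : List Int) (v' : List Bool) (c' : List Int),
          v'.count false ≤ f → (∀ y ∈ c', PySem.List.pyGet? v' y = some true) →
          l.foldl (fun st2 nb =>
            match PySem.List.pyGet? st2.1 nb with
            | some false => pvDfsA g f nb st2
            | _ => st2) (v', c') = pvDfsB g l v' c' := by
        intro l
        induction l with
        | nil => intro v' c' _ _; rw [List.foldl_nil, pvDfsB]
        | cons nb l' ihl =>
          intro v' c' hcnt' hinv'
          rw [show nb :: l' = [nb] ++ l' from rfl, pv_dfsB_split g [nb] l' v' c',
              ← ihl (pvDfsB g [nb] v' c').1 (pvDfsB g [nb] v' c').2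
                (le_trans (pv_dfsB_count_le g [nb] v' c') hcnt')
                (pv_dfsB_comp_inv g [nb] v' c' hinv'),
              List.cons_append, List.nil_append, List.foldl_cons]
          by_cases hnb : PySem.List.pyGet? v' nb = some false
          · simp only [hnb]
            rw [ih nb v' c' hcnt' hinv']
          · have hone : pvDfsB g [nb] v' c' = (v', c') := by
              rw [pvDfsB_skip g nb [] v' c' hnb, pvDfsB]
            rw [hone]
            congr 1
            cases hnb2 : PySem.List.pyGet? v' nb with
            | none => simp
            | some bb => cases bb with
              | false => exact absurd hnb2 hnb
              | true => simp
      exact FOLD (g.getD x []) (PySem.List.pySetD v x true) (gp ++ [x]) hcnt hinv1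
    · rw [pvDfsA, pvDfsB_skip g x [] v gp hv, pvDfsB]
      cases hv2 : PySem.List.pyGet? v x with
      | none => rfl
      | some b => cases b with
        | false => exact absurd hv2 hv
        | true => rfl

-- the two adjacency builds agree
theorem pv_adj_eq (wmap : List (List Int)) : (pvBuildA wmap).1 = pvAdjB wmap := by
  unfold pvBuildA pvAdjB
  suffices h : ∀ (l : List (List Int)) (d1 : PySem.Dict Int (List Int)) (d2 : PySem.Dict Int Int),
      (l.foldl (fun st each =>
        match each with
        | a :: b :: _ => (st.1.insert a (st.1.getD a [] ++ [b]), st.2.insert a (st.2.getD a 0 + 1))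
        | _ => st) (d1, d2)).1 =
      l.foldl (fun d e =>
        match e with
        | a :: b :: _ => d.insert a (d.getD a [] ++ [b])
        | _ => d) d1 by
    exact h wmap PySem.Dict.empty PySem.Dict.empty
  intro l
  induction l with
  | nil => intro d1 d2; rfl
  | cons e rest ih =>
    intro d1 d2
    cases e with
    | nil => exact ih d1 d2
    | cons a t =>
      cases t with
      | nil => exact ih d1 d2
      | cons b t' => exact ih _ _

-- the out-degree dict always holds the length of the adjacency list
theorem pv_deg_eq (wmap : List (List Int)) (x : Int) :
    (pvBuildA wmap).2.getD x 0 = (((pvBuildA wmap).1.getD x []).length : Int) := by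
  unfold pvBuildA
  suffices h : ∀ (l : List (List Int)) (d1 : PySem.Dict Int (List Int)) (d2 : PySem.Dict Int Int),
      (∀ y, d2.getD y 0 = ((d1.getD y []).length : Int)) →
      ∀ y, (l.foldl (fun st each =>
        match each with
        | a :: b :: _ => (st.1.insert a (st.1.getD a [] ++ [b]), st.2.insert a (st.2.getD a 0 + 1))
        | _ => st) (d1, d2)).2.getD y 0 =
        (((l.foldl (fun st each =>
        match each with
        | a :: b :: _ => (st.1.insert a (st.1.getD a [] ++ [b]), st.2.insert a (st.2.getD a 0 + 1))
        | _ => st) (d1, d2)).1.getD y []).length : Int) by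
    exact h wmap PySem.Dict.empty PySem.Dict.empty (by intro y; simp [PySem.Dict.getD_empty]) x
  intro l
  induction l with
  | nil => intro d1 d2 h y; exact h y
  | cons e rest ih =>
    intro d1 d2 h y
    cases e with
    | nil => exact ih d1 d2 h y
    | cons a t =>
      cases t with
      | nil => exact ih d1 d2 h y
      | cons b t' =>
        refine ih _ _ ?_ y
        intro z
        rw [PySem.Dict.getD_insert, PySem.Dict.getD_insert]
        by_cases hz : z = a
        · simp [hz, h a]
        · simp [hz, h z]

-- under Pre_ a nonempty wmap yields a nonempty graphDict
theorem pv_build_ne (e : List Int) (rest : List (List Int)) (a b : Int) (t : List Int)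
    (he : e = a :: b :: t) : (pvBuildA (e :: rest)).1.items ≠ [] := by
  subst he
  unfold pvBuildA
  rw [List.foldl_cons]
  suffices h : ∀ (l : List (List Int)) (d1 : PySem.Dict Int (List Int)) (d2 : PySem.Dict Int Int),
      d1.items ≠ [] →
      (l.foldl (fun st each =>
        match each with
        | a :: b :: _ => (st.1.insert a (st.1.getD a [] ++ [b]), st.2.insert a (st.2.getD a 0 + 1))
        | _ => st) (d1, d2)).1.items ≠ [] by
    refine h rest _ _ ?_
    show ((PySem.Dict.empty : PySem.Dict Int (List Int)).insert a
      ((PySem.Dict.empty : PySem.Dict Int (List Int)).getD a [] ++ [b])).items ≠ []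
    simp [PySem.Dict.items_insert, PySem.Dict.contains_empty]
  intro l
  induction l with
  | nil => intro d1 d2 h; exact h
  | cons e rest ih =>
    intro d1 d2 h
    cases e with
    | nil => exact ih d1 d2 h
    | cons a t =>
      cases t with
      | nil => exact ih d1 d2 h
      | cons b t' =>
        refine ih _ _ ?_
        rw [PySem.Dict.items_insert]
        by_cases hc : d1.contains a
        · simp only [hc, if_true]
          intro hmap
          exact h (List.map_eq_nil_iff.mp hmap)
        · simp [hc]

-- main loop lemma
theorem pv_loop (g : PySem.Dict Int (List Int)) (ect : PySem.Dict Int Int) (N : Nat)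
    (hdeg : ∀ y, ect.getD y 0 = ((g.getD y []).length : Int)) :
    ∀ (l : List Int) (v : List Bool) (acc : List Int), v.length = N →
      (((pvLoopA g ect (N + 1) l v acc).2.map (fun r => decide (r ≤ 1))).all id) =
      ((acc.map (fun r => decide (r ≤ 1))).all id && pvLoopB g l v) := by
  intro l
  induction l with
  | nil =>
    intro v acc hlen
    rw [pvLoopA, pvLoopB, Bool.and_true]
  | cons en rest ih =>
    intro v acc hlen
    have hcnt : v.count false ≤ N := hlen ▸ List.count_le_length
    have hAB : pvDfsA g (N + 1) en (v, []) = pvDfsB g [en] v [] :=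
      pv_A2B g (N + 1) en v [] (by omega) (by intro y hy; simp at hy)
    have hlen' : (pvDfsB g [en] v []).1.length = N := by
      rw [pv_dfsB_length]; exact hlen
    have hnoe : (pvDfsB g [en] v []).2.foldl (fun acc2 x => acc2 + ect.getD x 0) 0 =
        ((pvDfsB g [en] v []).2.map (fun x => ((g.getD x []).length : Int))).sum := by
      rw [PySem.List.foldl_add]
      simp only [zero_add]
      congr 1
      exact List.map_congr_left (fun x _ => hdeg x)
    rw [pvLoopA, pvLoopB, hAB]
    by_cases hgt : 2 < (pvDfsB g [en] v []).2.length
    · simp only [hgt, if_true]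
      by_cases hval : 1 < ((pvDfsB g [en] v []).2.map (fun x => ((g.getD x []).length : Int))).sum
          - ((pvDfsB g [en] v []).2.length : Int) + 1
      · simp only [hval, if_true]
        rw [ih _ _ hlen']
        rw [List.map_append, List.all_append]
        simp [hnoe]
        omega
      · simp only [hval, if_false]
        rw [ih _ _ hlen']
        rw [List.map_append, List.all_append]
        simp only [hnoe]
        have hx : (List.map (fun x => ((g.getD x []).length : Int)) (pvDfsB g [en] v []).2).sum ≤
            ((pvDfsB g [en] v []).2.length : Int) := by omega
        simp [hx]
    · simp only [hgt, if_false]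
      exact ih _ _ hlen'

-- ===== VERDICT (by name: the statement is the Claim_ definition above) =====
theorem isPseudoforest_spec : Claim_equal_isPseudoforest := by
  intro n wmap _hdom hpre
  unfold Spec_isPseudoforest
  cases wmap with
  | nil =>
    rfl
  | cons e rest =>
    obtain ⟨hlen, _⟩ := hpre e (List.mem_cons_self)
    obtain ⟨a, t, he⟩ : ∃ a t, e = a :: t := by
      cases e with
      | nil => simp at hlen
      | cons a t => exact ⟨a, t, rfl⟩
    obtain ⟨b, t', ht⟩ : ∃ b t', t = b :: t' := by
      cases t with
      | nil => rw [he] at hlen; simp at hlen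
      | cons b t' => exact ⟨b, t', rfl⟩
    have hne := pv_build_ne e rest a b t' (by rw [he, ht])
    unfold isPseudoforest isPseudoforest_alt
    simp only [hne, if_false, reduceCtorEq]
    have := pv_loop (pvBuildA (e :: rest)).1 (pvBuildA (e :: rest)).2 n.toNat
      (fun y => pv_deg_eq (e :: rest) y)
      (PySem.List.pyRange 0 n 1) (List.replicate n.toNat false) []
      (List.length_replicate)
    rw [pv_adj_eq (e :: rest)] at this ⊢
    simpa using this
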